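-- pv_equiv track=rewrite | github.com/radiantchoi/PythonPractices | PythonForCodingTest/solved/exercises/9.py | check
-- ===== SOURCE A (Python) =====
-- def check(length, s):
--     result = ""
--     current = s[0:length]
--     count = 1
--
--     for i in range(length, len(s), length):
--         snippet = s[i:i+length]
--         if snippet == current:
--             count += 1
--         else:
--             if count > 1:
--                 result += str(count)
--             count = 1
--             result += current
--             current = snippet
--
--     if count > 1:
--         result += str(count)
--     result += current
--
--     return result
-- ===== SOURCE B (Python) =====
-- def check(length, s):
--     # staged pipeline: chunk list -> run-boundary index list -> pairwise pieces
--     chunks = [s[i:i + length] for i in range(0, len(s), length)]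
--     n = len(chunks)
--     breaks = [i for i in range(n) if i == 0 or chunks[i] != chunks[i - 1]] + [n]
--     pieces = []
--     for start, end in zip(breaks, breaks[1:]):
--         run = end - start
--         if run > 1:
--             pieces.append(str(run))
--         pieces.append(chunks[start])
--     return "".join(pieces)
-- ===== Notes on version B (the rewrite author's own statement) =====
-- stated objective: alternative
-- what changed: B replaces A's streaming current/count state machine with a staged pipeline: it materialises the chunk list, computes the list of run-boundary indices by pairwise comparison, and then emits one piece per adjacent boundary pair (run length = index difference), joining at the end.
-- intended difference: For negative length with |length| < len(s), A returns the accidental slice s[0:length] (the input minus its last |length| characters) while B returns '' (there are no chunks of negative size); B's value is the intended one for a chunk-compression routine. — e.g. on check(-2, "abcd"): A returns "ab", B returns ""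
import Mathlib
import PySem

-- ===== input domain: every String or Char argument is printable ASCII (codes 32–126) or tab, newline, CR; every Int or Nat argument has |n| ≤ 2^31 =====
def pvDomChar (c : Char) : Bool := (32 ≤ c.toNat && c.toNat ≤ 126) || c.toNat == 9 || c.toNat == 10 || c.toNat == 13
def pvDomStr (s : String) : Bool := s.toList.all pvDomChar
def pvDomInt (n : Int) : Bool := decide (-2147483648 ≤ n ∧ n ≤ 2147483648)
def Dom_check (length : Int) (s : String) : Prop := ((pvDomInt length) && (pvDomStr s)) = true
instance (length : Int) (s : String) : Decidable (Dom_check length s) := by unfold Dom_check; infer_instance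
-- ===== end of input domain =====

-- B replaces A's streaming current/count state machine by a staged pipeline:
-- chunk list, then run-boundary index list, then one piece per adjacent boundary pair.

-- ===== PORT A =====
-- state: (result, current, count); string values carried as List Char, wrapped at the end
def check (length : Int) (s : String) : String :=
  let cs := s.toList
  let st := (PySem.List.pyRange length (cs.length : Int) length).foldl
    (fun (st : List Char × List Char × Int) i =>
      let snippet := PySem.List.slice cs (some i) (some (i + length))
      if snippet == st.2.1 then (st.1, st.2.1, st.2.2 + 1)
      else (st.1 ++ (if st.2.2 > 1 then PySem.Int.toChars st.2.2 else []) ++ st.2.1, snippet, 1))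
    ([], PySem.List.slice cs (some 0) (some length), 1)
  String.ofList (st.1 ++ (if st.2.2 > 1 then PySem.Int.toChars st.2.2 else []) ++ st.2.1)

-- ===== PORT B =====
-- chunks[start] is always in range when read (start < n), so the .getD [] default is unreachable
def check_alt (length : Int) (s : String) : String :=
  let chunks := (PySem.List.pyRange 0 (s.toList.length : Int) length).map
      (fun i => PySem.List.slice s.toList (some i) (some (i + length)))
  let n : Int := (chunks.length : Int)
  let breaks := ((PySem.List.pyRange 0 n 1).filter
      (fun i => i == 0 || !(PySem.List.pyGet? chunks i == PySem.List.pyGet? chunks (i - 1)))) ++ [n]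
  String.ofList ((breaks.zip breaks.tail).foldl
    (fun acc p =>
      acc ++ ((if p.2 - p.1 > 1 then PySem.Int.toChars (p.2 - p.1) else [])
          ++ ((PySem.List.pyGet? chunks p.1).getD [])))
    [])

-- ===== PRECONDITION & SPEC =====
-- Pre_ excludes exactly length = 0, on which range() raises ValueError in both programs.
def Pre_check (length : Int) (s : String) : Prop := length ≠ 0
instance (length : Int) (s : String) : Decidable (Pre_check length s) := by unfold Pre_check; infer_instance
def pvWitness_check : Int × String := (2, "aabbbbcd")

-- For negative length with |length| < len(s), A returns the accidental slice s[0:length] (the input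
-- minus its last |length| characters) while B returns "" (there are no chunks of negative size);
-- B's value is the intended one for a chunk-compression routine.
def D_check (length : Int) (s : String) : Prop := length < 0 ∧ 0 < length + (s.toList.length : Int)
instance (length : Int) (s : String) : Decidable (D_check length s) := by unfold D_check; infer_instance

def Spec_check (length : Int) (s : String) (out : String) : Prop := ¬ D_check length s → out = check_alt length s
instance (length : Int) (s : String) (out : String) : Decidable (Spec_check length s out) := by unfold Spec_check; infer_instance

def pvDiffWitness_check : Int × String := (-2, "abcd")
def pvDiffWitnessOut_check : String × String := ("ab", "")

-- ===== CLAIM (what is proved, stated in full; the proofs are below) =====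
def Claim_unchanged_check : Prop := ∀ (length : Int) (s : String), Dom_check length s → Pre_check length s → Spec_check length s (check length s)
def Claim_changed_check : Prop := Dom_check (pvDiffWitness_check.1) (pvDiffWitness_check.2) ∧ Pre_check (pvDiffWitness_check.1) (pvDiffWitness_check.2) ∧ D_check (pvDiffWitness_check.1) (pvDiffWitness_check.2) ∧ check (pvDiffWitness_check.1) (pvDiffWitness_check.2) = pvDiffWitnessOut_check.1 ∧ check_alt (pvDiffWitness_check.1) (pvDiffWitness_check.2) = pvDiffWitnessOut_check.2 ∧ pvDiffWitnessOut_check.1 ≠ pvDiffWitnessOut_check.2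
def Claim_exact_check : Prop := ∀ (length : Int) (s : String), Dom_check length s → Pre_check length s → D_check length s → check length s ≠ check_alt length s

-- ===== LEMMAS AND PROOFS =====

-- the reference run-length grouping both ports are reduced to
def spanEq (x : List Char) : List (List Char) → Nat × List (List Char)
  | [] => (0, [])
  | y :: ys => if y = x then ((spanEq x ys).1 + 1, (spanEq x ys).2) else (0, y :: ys)

theorem spanEq_len_le (x : List Char) : ∀ l : List (List Char), (spanEq x l).2.length ≤ l.length := by
  intro l
  induction l with
  | nil => simp [spanEq]
  | cons y ys ih =>
    by_cases h : y = x
    · simp only [spanEq, if_pos h]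
      exact le_trans ih (Nat.le_succ _)
    · simp [spanEq, if_neg h]

def groupOut : List (List Char) → List Char
  | [] => []
  | x :: xs =>
    (if ((spanEq x xs).1 + 1 : Int) > 1 then PySem.Int.toChars ((spanEq x xs).1 + 1 : Int) else [])
      ++ x ++ groupOut (spanEq x xs).2
termination_by l => l.length
decreasing_by exact Nat.lt_succ_of_le (spanEq_len_le x xs)

theorem pyRange_pos_nil (a b st : Int) (hs : 0 < st) (hba : b ≤ a) :
    PySem.List.pyRange a b st = [] := by
  rw [PySem.List.pyRange_of_pos a b hs]
  simp [not_lt.mpr hba]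

theorem pyRange_pos_cons (a b st : Int) (hs : 0 < st) (hab : a < b) :
    PySem.List.pyRange a b st = a :: PySem.List.pyRange (a + st) b st := by
  rw [PySem.List.pyRange_of_pos a b hs, PySem.List.pyRange_of_pos (a + st) b hs]
  have hq0 : (0:Int) ≤ (b - a - 1) / st := Int.ediv_nonneg (by omega) (le_of_lt hs)
  have hsplit : (b - a + st - 1) / st = (b - a - 1) / st + 1 := by
    have h1 := Int.add_mul_ediv_right (b - a - 1) 1 (ne_of_gt hs)
    rw [one_mul] at h1
    rw [show b - a + st - 1 = b - a - 1 + st by ring, h1]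
  have hcnt : (if a + st < b then ((b - (a + st) + st - 1) / st).toNat else 0)
      = ((b - a - 1) / st).toNat := by
    by_cases h : a + st < b
    · rw [if_pos h]
      have : b - (a + st) + st - 1 = b - a - 1 := by ring
      rw [this]
    · rw [if_neg h]
      have : (b - a - 1) / st = 0 := Int.ediv_eq_zero_of_lt (by omega) (by omega)
      simp [this]
  have htn : ((b - a - 1) / st + 1).toNat = ((b - a - 1) / st).toNat + 1 := by omega
  rw [if_pos hab, hcnt, hsplit, htn, List.range_succ_eq_map, List.map_cons, List.map_map]
  congr 1
  · simp
  · apply List.map_congr_left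
    intro k _
    simp only [Function.comp]
    push_cast
    ring

theorem pyRange_neg_nil (a b st : Int) (hs : st < 0) (hab : a ≤ b) :
    PySem.List.pyRange a b st = [] := by
  simp [PySem.List.pyRange, show ¬ st = 0 by omega, show ¬ 0 < st by omega, show ¬ b < a by omega]

-- ---- A side: the state machine produces groupOut of the chunk list ----

theorem spanEq_replicate (x : List Char) (n : Nat) (l : List (List Char)) :
    spanEq x (List.replicate n x ++ l) = ((spanEq x l).1 + n, (spanEq x l).2) := by
  induction n with
  | zero => simp
  | succ m ih =>
    rw [List.replicate_succ, List.cons_append]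
    simp [spanEq, ih, Nat.add_assoc]

theorem replicate_append_cons (n : Nat) (x : List Char) (l : List (List Char)) :
    List.replicate n x ++ (x :: l) = List.replicate (n + 1) x ++ l := by
  induction n with
  | zero => simp
  | succ m ih => simp [List.replicate_succ, List.cons_append, ih]

theorem groupOut_replicate_cons (x c : List Char) (n : Nat) (l : List (List Char)) (hne : c ≠ x) :
    groupOut (List.replicate (n + 1) x ++ (c :: l)) =
      (if ((n:Int) + 1 > 1) then PySem.Int.toChars ((n:Int) + 1) else [])
        ++ x ++ groupOut (c :: l) := by
  rw [List.replicate_succ, List.cons_append, groupOut]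
  have hspan : spanEq x (List.replicate n x ++ (c :: l)) = (n, c :: l) := by
    rw [spanEq_replicate]
    simp [spanEq, if_neg hne]
  rw [hspan]

theorem groupOut_replicate_nil (x : List Char) (n : Nat) :
    groupOut (List.replicate (n + 1) x) =
      (if ((n:Int) + 1 > 1) then PySem.Int.toChars ((n:Int) + 1) else []) ++ x := by
  rw [List.replicate_succ, groupOut]
  have hspan : spanEq x (List.replicate n x) = (n, []) := by
    have := spanEq_replicate x n []
    simpa [spanEq] using this
  rw [hspan]
  simp [groupOut]

theorem loop_eq (cs : List Char) (L : Int) :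
    ∀ (idxs : List Int) (res cur : List Char) (k : Int) (cnt : Nat), k = (cnt : Int) + 1 →
      (idxs.foldl (fun (st : List Char × List Char × Int) i => if PySem.List.slice cs (some i) (some (i + L)) == st.2.1 then (st.1, st.2.1, st.2.2 + 1) else (st.1 ++ (if st.2.2 > 1 then PySem.Int.toChars st.2.2 else []) ++ st.2.1, PySem.List.slice cs (some i) (some (i + L)), 1)) (res, cur, k)).1 ++ (if (idxs.foldl (fun (st : List Char × List Char × Int) i => if PySem.List.slice cs (some i) (some (i + L)) == st.2.1 then (st.1, st.2.1, st.2.2 + 1) else (st.1 ++ (if st.2.2 > 1 then PySem.Int.toChars st.2.2 else []) ++ st.2.1, PySem.List.slice cs (some i) (some (i + L)), 1)) (res, cur, k)).2.2 > 1 then PySem.Int.toChars (idxs.foldl (fun (st : List Char × List Char × Int) i => if PySem.List.slice cs (some i) (some (i + L)) == st.2.1 then (st.1, st.2.1, st.2.2 + 1) else (st.1 ++ (if st.2.2 > 1 then PySem.Int.toChars st.2.2 else []) ++ st.2.1, PySem.List.slice cs (some i) (some (i + L)), 1)) (res, cur, k)).2.2 else []) ++ (idxs.foldl (fun (st : List Char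 × List Char × Int) i => if PySem.List.slice cs (some i) (some (i + L)) == st.2.1 then (st.1, st.2.1, st.2.2 + 1) else (st.1 ++ (if st.2.2 > 1 then PySem.Int.toChars st.2.2 else []) ++ st.2.1, PySem.List.slice cs (some i) (some (i + L)), 1)) (res, cur, k)).2.1
      = res ++ groupOut (List.replicate (cnt + 1) cur
          ++ idxs.map (fun i => PySem.List.slice cs (some i) (some (i + L)))) := by
  intro idxs
  induction idxs with
  | nil =>
    intro res cur k cnt hk
    subst hk
    simp only [List.foldl_nil, List.map_nil, List.append_nil]
    rw [groupOut_replicate_nil]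
    simp
  | cons i rest ih =>
    intro res cur k cnt hk
    subst hk
    simp only [List.foldl_cons, List.map_cons]
    by_cases h : PySem.List.slice cs (some i) (some (i + L)) = cur
    · simp only [h, beq_self_eq_true, if_true]
      rw [ih res cur ((cnt : Int) + 1 + 1) (cnt + 1) (by push_cast; ring)]
      rw [replicate_append_cons]
    · simp only [beq_eq_false_iff_ne.mpr h, Bool.false_eq_true, if_false]
      rw [ih _ _ 1 0 (by norm_num)]
      rw [groupOut_replicate_cons cur _ cnt _ h]
      simp [List.replicate_one, List.append_assoc]

theorem check_eq_group (length : Int) (s : String) (h : 1 ≤ length) :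
    check length s = String.ofList (groupOut
      ((PySem.List.pyRange 0 (s.toList.length : Int) length).map
        (fun i => PySem.List.slice s.toList (some i) (some (i + length))))) := by
  unfold check
  cases hcs : s.toList with
  | nil =>
    simp only [List.length_nil, Nat.cast_zero]
    rw [pyRange_pos_nil length 0 length (by omega) (by omega),
        pyRange_pos_nil 0 0 length (by omega) (by omega)]
    simp [groupOut, PySem.List.slice]
  | cons c rest =>
    have hn : (0 : Int) < ((c :: rest).length : Int) := by
      exact_mod_cast Nat.succ_pos rest.length
    rw [pyRange_pos_cons 0 _ length (by omega) hn, List.map_cons, zero_add]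
    exact congrArg String.ofList (loop_eq (c :: rest) length
      (PySem.List.pyRange length ((c :: rest).length : Int) length)
      [] (PySem.List.slice (c :: rest) (some 0) (some length)) 1 0 (by norm_num))

-- ---- B side: the boundary-pair pipeline produces groupOut of the chunk list ----

-- one output piece per adjacent boundary pair
def gpiece (chunks : List (List Char)) (p : Int × Int) : List Char :=
  (if p.2 - p.1 > 1 then PySem.Int.toChars (p.2 - p.1) else [])
    ++ ((PySem.List.pyGet? chunks p.1).getD [])

-- Nat-level boundary list of Source B's comprehension
def brN (l : List (List Char)) : List Nat :=
  (List.range l.length).filter (fun i => i == 0 || !(l[i]? == l[i - 1]?)) ++ [l.length]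

theorem spanEq_decomp (x : List Char) : ∀ xs : List (List Char),
    xs = List.replicate (spanEq x xs).1 x ++ (spanEq x xs).2 ∧
      (∀ y, ((spanEq x xs).2).head? = some y → y ≠ x) := by
  intro xs
  induction xs with
  | nil => simp [spanEq]
  | cons y ys ih =>
    by_cases h : y = x
    · simp only [spanEq, if_pos h]
      refine ⟨?_, ih.2⟩
      conv_lhs => rw [h, ih.1]
      rw [← List.cons_append, ← List.replicate_succ]
    · simp only [spanEq, if_neg h]
      exact ⟨by simp, by intro z hz; simp at hz; rw [← hz]; exact h⟩

theorem brN_nil : brN [] = [0] := by simp [brN]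

theorem brN_head (l : List (List Char)) (hne : l ≠ []) : ∃ t, brN l = 0 :: t := by
  unfold brN
  cases l with
  | nil => exact absurd rfl hne
  | cons a as =>
    rw [List.length_cons, List.range_succ_eq_map, List.filter_cons]
    simp only [beq_self_eq_true, Bool.true_or, if_pos]
    exact ⟨_, rfl⟩

theorem pairs_map {α β : Type} (f : α → β) (l : List α) :
    (l.map f).zip ((l.map f).tail) = (l.zip l.tail).map (Prod.map f f) := by
  cases l with
  | nil => rfl
  | cons a t => simpa using List.zip_map (f := f) (g := f) (l₁ := a :: t) (l₂ := t)

theorem gpiece_shift (K : Nat) (x : List Char) (rest : List (List Char)) (p : Nat × Nat) :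
    gpiece (List.replicate K x ++ rest) ((K + p.1 : Nat), (K + p.2 : Nat)) =
      gpiece rest ((p.1 : Int), (p.2 : Int)) := by
  unfold gpiece
  have hc : ((K + p.2 : Nat) : Int) - ((K + p.1 : Nat) : Int) = (p.2 : Int) - (p.1 : Int) := by
    push_cast; ring
  have hg : PySem.List.pyGet? (List.replicate K x ++ rest) ((K + p.1 : Nat) : Int)
      = PySem.List.pyGet? rest (p.1 : Int) := by
    rw [PySem.List.pyGet?_natCast, PySem.List.pyGet?_natCast,
        List.getElem?_append_right (by simp)]
    simp
  rw [hc, hg]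

theorem gpiece_head (K : Nat) (hK : 1 ≤ K) (x : List Char) (rest : List (List Char)) :
    (List.replicate K x ++ rest)[0]? = some x := by
  rw [List.getElem?_append_left (by simpa using hK), List.getElem?_replicate, if_pos (by omega)]

theorem brN_decomp (K : Nat) (hK : 1 ≤ K) (x : List Char) (rest : List (List Char))
    (hhead : ∀ y, rest.head? = some y → y ≠ x) :
    brN (List.replicate K x ++ rest) = 0 :: (brN rest).map (K + ·) := by
  obtain ⟨k, rfl⟩ : ∃ k, K = k + 1 := ⟨K - 1, by omega⟩
  unfold brN
  have hlen : (List.replicate (k + 1) x ++ rest).length = (k + 1) + rest.length := by simp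
  have hget : ∀ j, j < k + 1 → (List.replicate (k + 1) x ++ rest)[j]? = some x := by
    intro j hj
    rw [List.getElem?_append_left (by simpa using hj), List.getElem?_replicate, if_pos hj]
  rw [hlen, List.range_add, List.filter_append]
  -- first block of the range: only index 0 survives
  have h1 : (List.range (k + 1)).filter
      (fun i => i == 0 || !((List.replicate (k + 1) x ++ rest)[i]? == (List.replicate (k + 1) x ++ rest)[i - 1]?)) = [0] := by
    rw [List.range_succ_eq_map, List.filter_cons]
    simp only [beq_self_eq_true, Bool.true_or, if_pos]
    have h0 : (List.map Nat.succ (List.range k)).filter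
        (fun i => i == 0 || !((List.replicate (k + 1) x ++ rest)[i]? == (List.replicate (k + 1) x ++ rest)[i - 1]?)) = [] := by
      rw [List.filter_eq_nil_iff]
      intro a ha
      obtain ⟨j, hj, rfl⟩ := List.mem_map.mp ha
      have hjk := List.mem_range.mp hj
      simp only [Nat.succ_eq_add_one]
      rw [hget (j + 1) (by omega), show j + 1 - 1 = j from rfl, hget j (by omega)]
      simp
    rw [h0]
  rw [h1]
  -- second block: shifted boundary list of rest
  have h2 : ((List.range rest.length).map (fun i => (k + 1) + i)).filter
      (fun i => i == 0 || !((List.replicate (k + 1) x ++ rest)[i]? == (List.replicate (k + 1) x ++ rest)[i - 1]?)) =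
      ((List.range rest.length).filter (fun i => i == 0 || !(rest[i]? == rest[i - 1]?))).map (fun i => (k + 1) + i) := by
    rw [List.filter_map]
    congr 1
    apply List.filter_congr
    intro j hj
    have hjm := List.mem_range.mp hj
    have hgj : (List.replicate (k + 1) x ++ rest)[(k + 1) + j]? = rest[j]? := by
      rw [List.getElem?_append_right (by simp)]
      simp
    rw [Function.comp]
    cases j with
    | zero =>
      obtain ⟨y, hy⟩ : ∃ y, rest[0]? = some y := by
        cases rest with
        | nil => simp at hjm
        | cons c cs => exact ⟨c, rfl⟩
      have hyx : y ≠ x := by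
        apply hhead
        cases rest with
        | nil => simp at hy
        | cons c cs => simpa using hy
      rw [Nat.add_zero] at hgj ⊢
      rw [hgj, show k + 1 - 1 = k from rfl, hget k (by omega), hy]
      simp [hyx]
    | succ j' =>
      have hgj' : (List.replicate (k + 1) x ++ rest)[(k + 1) + (j' + 1) - 1]? = rest[j']? := by
        rw [show (k + 1) + (j' + 1) - 1 = (k + 1) + j' from by omega,
            List.getElem?_append_right (by simp)]
        simp
      rw [hgj, hgj']
      simp
  rw [h2]
  simp only [List.map_append, List.map_cons, List.map_nil]
  simp

theorem pairs_flatMap_eq_group : ∀ (n : Nat) (l : List (List Char)), l.length ≤ n →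
    ((brN l).zip (brN l).tail).flatMap (fun p => gpiece l ((p.1 : Int), (p.2 : Int))) = groupOut l := by
  intro n
  induction n with
  | zero =>
    intro l hl
    rw [List.length_eq_zero_iff.mp (Nat.le_zero.mp hl)]
    simp [brN_nil, groupOut]
  | succ n ih =>
    intro l hl
    cases l with
    | nil => simp [brN_nil, groupOut]
    | cons x xs =>
      have hdecomp := spanEq_decomp x xs
      have hlenle := spanEq_len_le x xs
      rcases e : spanEq x xs with ⟨k, rest⟩
      rw [e] at hdecomp hlenle
      obtain ⟨hdec, hhead⟩ := hdecomp
      simp only at hdec hhead hlenle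
      have hl2 : x :: xs = List.replicate (k + 1) x ++ rest := by
        rw [List.replicate_succ, List.cons_append, ← hdec]
      have hrlen : rest.length ≤ n := by
        simp only [List.length_cons] at hl
        omega
      rw [hl2, brN_decomp (k + 1) (by omega) x rest hhead]
      cases rest with
      | nil =>
        rw [brN_nil]
        simp only [List.map_cons, List.map_nil, Nat.add_zero, List.append_nil]
        rw [show ((0 : Nat) :: [k + 1]).zip (((0 : Nat) :: [k + 1]).tail) = [(0, k + 1)] from rfl,
            List.flatMap_cons, List.flatMap_nil, List.append_nil, groupOut_replicate_nil]
        have hx0 : (List.replicate (k + 1) x)[0]? = some x := by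
          rw [List.getElem?_replicate, if_pos (by omega)]
        have hz : PySem.List.pyGet? (List.replicate (k + 1) x) 0 = some x := by
          rw [show (0 : Int) = ((0 : Nat) : Int) from rfl, PySem.List.pyGet?_natCast]
          exact hx0
        simp only [gpiece, hz, Option.getD_some, Nat.cast_zero, sub_zero]
        push_cast
        rfl
      | cons c cs =>
        obtain ⟨t, hbr⟩ := brN_head (c :: cs) (by simp)
        have hcx : c ≠ x := hhead c (by simp)
        have hzip : ((0 : Nat) :: (brN (c :: cs)).map (fun i => k + 1 + i)).zip
              (((0 : Nat) :: (brN (c :: cs)).map (fun i => k + 1 + i)).tail)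
            = (0, k + 1) :: ((brN (c :: cs)).map (fun i => k + 1 + i)).zip
                (((brN (c :: cs)).map (fun i => k + 1 + i)).tail) := by
          simp only [hbr, List.map_cons, Nat.add_zero, List.tail_cons, List.zip_cons_cons]
        rw [hzip, List.flatMap_cons, pairs_map, List.flatMap_map]
        have hpt : (fun (p : Nat × Nat) =>
              gpiece (List.replicate (k + 1) x ++ c :: cs)
                ((((Prod.map (fun i => k + 1 + i) (fun i => k + 1 + i)) p).1 : Int),
                 (((Prod.map (fun i => k + 1 + i) (fun i => k + 1 + i)) p).2 : Int)))
            = fun (p : Nat × Nat) => gpiece (c :: cs) ((p.1 : Int), (p.2 : Int)) := by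
          funext p
          rw [Prod.map_fst, Prod.map_snd]
          exact gpiece_shift (k + 1) x (c :: cs) p
        rw [hpt, ih (c :: cs) hrlen, groupOut_replicate_cons x c k cs hcx]
        have hx0 := gpiece_head (k + 1) (by omega) x (c :: cs)
        have hz : PySem.List.pyGet? (List.replicate (k + 1) x ++ c :: cs) 0 = some x := by
          rw [show (0 : Int) = ((0 : Nat) : Int) from rfl, PySem.List.pyGet?_natCast]
          exact hx0
        simp only [gpiece, hz, Option.getD_some, Nat.cast_zero, sub_zero, List.append_assoc]
        push_cast
        rfl

theorem breaks_eq_brN (chunks : List (List Char)) :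
    ((PySem.List.pyRange 0 (chunks.length : Int) 1).filter
      (fun i => i == 0 || !(PySem.List.pyGet? chunks i == PySem.List.pyGet? chunks (i - 1)))) ++ [(chunks.length : Int)]
    = List.map (fun i : Nat => (i : Int)) (brN chunks) := by
  unfold brN
  rw [PySem.List.pyRange_one]
  have hrng : ((chunks.length : Int) - 0).toNat = chunks.length := by omega
  rw [hrng]
  have hmap : List.map (fun k : Nat => (0 : Int) + (k : Int)) (List.range chunks.length)
      = List.map (fun k : Nat => (k : Int)) (List.range chunks.length) := by
    apply List.map_congr_left
    intro a _
    omega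
  rw [hmap, List.filter_map, List.map_append]
  congr 1
  · congr 1
    apply List.filter_congr
    intro j _
    simp only [Function.comp_apply]
    cases j with
    | zero => simp
    | succ j' =>
      have h0 : (((j' + 1 : Nat) : Int) == 0) = false := by
        simp
        omega
      have h1 : ((j' + 1 : Nat) == 0) = false := by simp
      rw [h0, h1, Bool.false_or, Bool.false_or,
          show ((j' + 1 : Nat) : Int) - 1 = ((j' : Nat) : Int) from by push_cast; ring,
          PySem.List.pyGet?_natCast, PySem.List.pyGet?_natCast,
          show (j' + 1) - 1 = j' from rfl]

theorem check_alt_eq_group (length : Int) (s : String) :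
    check_alt length s = String.ofList (groupOut
      ((PySem.List.pyRange 0 (s.toList.length : Int) length).map
        (fun i => PySem.List.slice s.toList (some i) (some (i + length))))) := by
  suffices h : ∀ (chunks : List (List Char)),
      (let n : Int := (chunks.length : Int);
       let breaks := ((PySem.List.pyRange 0 n 1).filter
          (fun i => i == 0 || !(PySem.List.pyGet? chunks i == PySem.List.pyGet? chunks (i - 1)))) ++ [n];
       String.ofList ((breaks.zip breaks.tail).foldl
         (fun acc p => acc ++ ((if p.2 - p.1 > 1 then PySem.Int.toChars (p.2 - p.1) else [])
             ++ ((PySem.List.pyGet? chunks p.1).getD []))) []))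
      = String.ofList (groupOut chunks) by
    exact h _
  intro chunks
  dsimp only
  rw [breaks_eq_brN chunks, pairs_map]
  rw [show (fun (acc : List Char) (p : Int × Int) =>
        acc ++ ((if p.2 - p.1 > 1 then PySem.Int.toChars (p.2 - p.1) else [])
          ++ ((PySem.List.pyGet? chunks p.1).getD [])))
      = fun (acc : List Char) (p : Int × Int) => acc ++ gpiece chunks p from rfl]
  rw [PySem.List.foldl_append_eq_flatMap, List.nil_append, List.flatMap_map]
  have hpt : (fun (p : Nat × Nat) =>
        gpiece chunks (Prod.map (fun i : Nat => (i : Int)) (fun i : Nat => (i : Int)) p))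
      = fun (p : Nat × Nat) => gpiece chunks ((p.1 : Int), (p.2 : Int)) := by
    funext p
    cases p
    rfl
  rw [hpt, pairs_flatMap_eq_group chunks.length chunks (le_refl _)]

-- ---- negative length ----

theorem check_neg (length : Int) (s : String) (hlt : length < 0) :
    check length s = String.ofList (PySem.List.slice s.toList (some 0) (some length)) := by
  simp only [check]
  rw [pyRange_neg_nil length _ length hlt (le_trans (le_of_lt hlt) (Int.natCast_nonneg _))]
  simp

theorem check_alt_neg (length : Int) (s : String) (hlt : length < 0) :
    check_alt length s = String.ofList [] := by
  rw [check_alt_eq_group]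
  rw [pyRange_neg_nil 0 _ length hlt (Int.natCast_nonneg _)]
  simp [groupOut]

theorem slice_zero_neg (cs : List Char) (k : Nat) (hk : 0 < k) :
    PySem.List.slice cs (some 0) (some (-(k:Int))) = List.take (cs.length - k) cs := by
  rw [PySem.List.slice_zero_start]
  exact PySem.List.slice_to_neg_natCast cs k hk

theorem check_neg_take (length : Int) (s : String) (hlt : length < 0) :
    check length s = String.ofList (List.take (s.toList.length - (-length).toNat) s.toList) := by
  rw [check_neg length s hlt]
  have hL : length = -(((-length).toNat : Nat) : Int) := by omega
  conv_lhs => rw [hL]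
  rw [slice_zero_neg s.toList (-length).toNat (by omega)]

-- ===== VERDICT (by name: the statement is the Claim_ definition above) =====
theorem check_spec : Claim_unchanged_check := by
  intro length s _ hpre
  unfold Spec_check
  intro hnd
  rcases lt_or_gt_of_ne hpre with hlt | hgt
  · rw [check_neg_take length s hlt, check_alt_neg length s hlt]
    have hle : s.toList.length ≤ (-length).toNat := by
      unfold D_check at hnd
      simp only [not_and, not_lt] at hnd
      have := hnd hlt
      omega
    rw [Nat.sub_eq_zero_of_le hle, List.take_zero]
  · rw [check_eq_group length s (by omega), check_alt_eq_group length s]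

theorem check_changed : Claim_changed_check := by
  unfold Claim_changed_check
  refine ⟨by decide, by decide, by decide, by decide, ?_, by decide⟩
  exact check_alt_neg (-2) "abcd" (by norm_num)

theorem check_tight : Claim_exact_check := by
  intro length s _ _ hD
  obtain ⟨hlt, hpos⟩ := hD
  rw [check_neg_take length s hlt, check_alt_neg length s hlt]
  intro heq
  have h2 := congrArg String.toList heq
  rw [String.toList_ofList, String.toList_ofList] at h2
  rcases List.take_eq_nil_iff.mp h2 with h3 | h3
  · omega
  · rw [h3] at hpos
    simp at hpos
    omega
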